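-- pv_equiv track=rewrite | github.com/aertslab/scATAC-seq_benchmark | 0_resources/icisTarget/cistargetx/cistargetdb/gmtparser.py | load_collection_metadata
-- ===== SOURCE A (Python) =====
-- from collections import namedtuple, defaultdict
--
-- CollectionMetaData = namedtuple('CollectionMetaData', 'name description version sourceFile')
--
-- def load_collection_metadata(lines):
--     name, description, version = [None] * 3
--     for line in lines:
--         if not line.startswith('#') or "=" not in line: continue
--         columns = line.rstrip()[1:].split("=")
--         key = columns[0].strip()
--         value = "=".join(columns[1:]).strip()
--         if key == 'name':
--             name = value
--         elif key == 'description':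
--             description = value
--         elif key == 'version':
--             version = value
--     return CollectionMetaData(name, description, version, "\n".join(lines))
-- ===== SOURCE B (Python) =====
-- from collections import namedtuple
--
-- CollectionMetaData = namedtuple('CollectionMetaData', 'name description version sourceFile')
--
-- def load_collection_metadata(lines):
--     # Stage 1: collect all (key, value) pairs from qualifying comment lines.
--     pairs = []
--     for line in lines:
--         if line.startswith('#') and "=" in line:
--             columns = line.rstrip()[1:].split("=")
--             pairs.append((columns[0].strip(), "=".join(columns[1:]).strip()))
--     # Stage 2: for each field, the last assignment wins = first match scanning backwards.
--     def last_value(key):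
--         for k, v in reversed(pairs):
--             if k == key:
--                 return v
--         return None
--     return CollectionMetaData(last_value('name'), last_value('description'),
--                               last_value('version'), "\n".join(lines))
-- ===== Notes on version B (the rewrite author's own statement) =====
-- stated objective: alternative
-- what changed: Replaces A's single forward pass with three mutable slots overwritten by if/elif dispatch by a staged algorithm: first collect all parsed (key,value) pairs from qualifying lines, then resolve each field separately by a backwards first-match search over the pair list (last assignment wins).
import Mathlib
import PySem

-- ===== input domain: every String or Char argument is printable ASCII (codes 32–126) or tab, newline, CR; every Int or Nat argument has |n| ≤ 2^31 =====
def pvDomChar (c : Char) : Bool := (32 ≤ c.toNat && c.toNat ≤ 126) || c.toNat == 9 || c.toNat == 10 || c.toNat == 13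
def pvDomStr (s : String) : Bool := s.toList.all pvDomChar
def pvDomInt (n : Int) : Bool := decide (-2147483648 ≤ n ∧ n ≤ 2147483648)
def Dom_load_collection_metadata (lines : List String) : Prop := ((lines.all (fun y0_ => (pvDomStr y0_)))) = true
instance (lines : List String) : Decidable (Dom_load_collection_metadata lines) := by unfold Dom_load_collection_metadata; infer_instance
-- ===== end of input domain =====

-- B is a staged alternative: it first collects all parsed (key,value) pairs of qualifying
-- comment lines, then resolves each field by a backwards first-match search (last wins),
-- instead of A's single forward pass overwriting three slots via if/elif.

-- shared line parser: columns = line.rstrip()[1:].split("="); (columns[0].strip(), "=".join(columns[1:]).strip())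
def pvParseLine (line : String) : String × String :=
  let columns := (PySem.Str.split? (PySem.Str.slice (PySem.Str.rstrip line) (some 1) none) "=").getD []
  (PySem.Str.strip (columns.headD ""), PySem.Str.strip (PySem.Str.join "=" (columns.drop 1)))

-- ===== PORT A =====
-- loop body of A: skip non-'#'/'='-free lines, else if/elif dispatch on the parsed key
def pvStepA (acc : Option String × Option String × Option String) (line : String) :
    Option String × Option String × Option String :=
  if !(PySem.Str.startswith line "#") || !(PySem.Str.isIn "=" line) then acc
  else
    let kv := pvParseLine line
    if kv.1 = "name" then (some kv.2, acc.2.1, acc.2.2)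
    else if kv.1 = "description" then (acc.1, some kv.2, acc.2.2)
    else if kv.1 = "version" then (acc.1, acc.2.1, some kv.2)
    else acc

def load_collection_metadata (lines : List String) : Option String × Option String × Option String × String :=
  let st := lines.foldl pvStepA (none, none, none)
  (st.1, st.2.1, st.2.2, PySem.Str.join "\n" lines)

-- ===== PORT B =====
-- stage 1 loop body: append the parsed pair of every qualifying line
def pvPairs (lines : List String) : List (String × String) :=
  lines.foldl (fun acc line =>
    if PySem.Str.startswith line "#" && PySem.Str.isIn "=" line then acc ++ [pvParseLine line]
    else acc) []

-- stage 2: first match scanning a list (applied to the reversed pair list)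
def pvLastValue (key : String) : List (String × String) → Option String
  | [] => none
  | (k, v) :: rest => if k = key then some v else pvLastValue key rest

def load_collection_metadata_alt (lines : List String) : Option String × Option String × Option String × String :=
  let pairs := pvPairs lines
  (pvLastValue "name" pairs.reverse, pvLastValue "description" pairs.reverse,
   pvLastValue "version" pairs.reverse, PySem.Str.join "\n" lines)

-- ===== PRECONDITION & SPEC =====
def Spec_load_collection_metadata (lines : List String) (out : Option String × Option String × Option String × String) : Prop := out = load_collection_metadata_alt lines
instance (lines : List String) (out : Option String × Option String × Option String × String) : Decidable (Spec_load_collection_metadata lines out) := by unfold Spec_load_collection_metadata; infer_instance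

-- ===== CLAIM (what is proved, stated in full; the proofs are below) =====
def Claim_equal_load_collection_metadata : Prop := ∀ (lines : List String), Dom_load_collection_metadata lines → Spec_load_collection_metadata lines (load_collection_metadata lines)

-- ===== LEMMAS AND PROOFS =====

-- the pair-collecting fold peels its accumulator off the front
theorem pvPairs_acc (lines : List String) : ∀ (acc : List (String × String)),
    lines.foldl (fun acc line =>
      if PySem.Str.startswith line "#" && PySem.Str.isIn "=" line then acc ++ [pvParseLine line]
      else acc) acc = acc ++ pvPairs lines := by
  induction lines with
  | nil => intro acc; simp [pvPairs]
  | cons l rest ih =>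
    intro acc
    simp only [pvPairs, List.foldl]
    rw [ih, ih]
    split_ifs <;> simp

theorem pvPairs_cons (l : String) (rest : List String) :
    pvPairs (l :: rest) =
      (if PySem.Str.startswith l "#" && PySem.Str.isIn "=" l then [pvParseLine l] else []) ++ pvPairs rest := by
  unfold pvPairs
  simp only [List.foldl]
  rw [pvPairs_acc rest]
  split_ifs <;> simp [pvPairs]

-- first match distributes over append
theorem pvLastValue_append (key : String) (xs ys : List (String × String)) :
    pvLastValue key (xs ++ ys) = (pvLastValue key xs).or (pvLastValue key ys) := by
  induction xs with
  | nil => simp [pvLastValue]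
  | cons p rest ih =>
    obtain ⟨k, v⟩ := p
    by_cases h : k = key <;> simp [pvLastValue, h, ih]

-- A's one step, seen through B's eyes
theorem pv_step (l : String) (a : Option String × Option String × Option String) :
    pvStepA a l =
      ((pvLastValue "name" (if PySem.Str.startswith l "#" && PySem.Str.isIn "=" l then [pvParseLine l] else [])).or a.1,
       (pvLastValue "description" (if PySem.Str.startswith l "#" && PySem.Str.isIn "=" l then [pvParseLine l] else [])).or a.2.1,
       (pvLastValue "version" (if PySem.Str.startswith l "#" && PySem.Str.isIn "=" l then [pvParseLine l] else [])).or a.2.2) := by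
  unfold pvStepA
  cases hp : PySem.Str.startswith l "#" <;> cases hq : PySem.Str.isIn "=" l <;>
    simp only [Bool.not_true, Bool.not_false, Bool.or_false, Bool.or_true, Bool.and_self,
      Bool.false_and, Bool.and_false, if_true, if_false, Bool.false_eq_true,
      pvLastValue, Option.none_or]
  by_cases hn : (pvParseLine l).1 = "name" <;>
    by_cases hd : (pvParseLine l).1 = "description" <;>
      by_cases hv : (pvParseLine l).1 = "version" <;>
        simp_all

-- A's whole fold equals B's three backwards searches, over any accumulator
theorem pv_inv (lines : List String) : ∀ (a : Option String × Option String × Option String),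
    lines.foldl pvStepA a =
      ((pvLastValue "name" (pvPairs lines).reverse).or a.1,
       (pvLastValue "description" (pvPairs lines).reverse).or a.2.1,
       (pvLastValue "version" (pvPairs lines).reverse).or a.2.2) := by
  induction lines with
  | nil => intro a; simp [pvPairs, pvLastValue]
  | cons l rest ih =>
    intro a
    simp only [List.foldl]
    rw [ih (pvStepA a l), pv_step l a, pvPairs_cons, List.reverse_append]
    simp only [pvLastValue_append, Option.or_assoc]
    split_ifs <;> simp

-- ===== VERDICT (by name: the statement is the Claim_ definition above) =====
theorem load_collection_metadata_spec : Claim_equal_load_collection_metadata := by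
  intro lines _
  unfold Spec_load_collection_metadata load_collection_metadata load_collection_metadata_alt
  rw [pv_inv lines (none, none, none)]
  simp
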